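-- pv_equiv track=rewrite | github.com/posl/comment_recommendation | script/mod_gen/4_time/en/192_B/6.py | is_hard_to_read
-- ===== SOURCE A (Python) =====
-- def is_hard_to_read(s):
--     for i in range(0, len(s), 2):
--         if s[i] != s[i].upper():
--             return 'No'
--     for i in range(1, len(s), 2):
--         if s[i] != s[i].lower():
--             return 'No'
--     return 'Yes'
-- ===== SOURCE B (Python) =====
-- def is_hard_to_read(s):
--     even = s[::2]
--     odd = s[1::2]
--     return 'Yes' if even == even.upper() and odd == odd.lower() else 'No'
-- ===== Notes on version B (the rewrite author's own statement) =====
-- stated objective: idiomatic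
-- what changed: Replaces A's two early-return index loops over range(0,len,2)/range(1,len,2) with whole even/odd subsequence slices s[::2]/s[1::2] compared against their upper()/lower() images.
import Mathlib
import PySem

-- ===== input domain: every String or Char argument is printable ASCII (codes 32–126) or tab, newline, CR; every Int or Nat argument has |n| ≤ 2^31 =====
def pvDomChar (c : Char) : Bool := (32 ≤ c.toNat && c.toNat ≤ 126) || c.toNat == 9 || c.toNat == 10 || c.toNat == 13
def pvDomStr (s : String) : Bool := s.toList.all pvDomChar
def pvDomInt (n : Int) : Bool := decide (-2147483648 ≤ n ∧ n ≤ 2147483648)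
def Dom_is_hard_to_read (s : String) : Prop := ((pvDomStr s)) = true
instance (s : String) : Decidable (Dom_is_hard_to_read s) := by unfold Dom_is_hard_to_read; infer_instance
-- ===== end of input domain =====

-- B replaces A's two index-stepping loops by whole even/odd slices compared with their upper/lower images (idiomatic, same cost).

-- ===== PORT A =====
-- one early-return index loop of A: scan the index list, return "No" at the first
-- character differing from its case image, none if the loop falls through
-- (s[i] is always in range here since the indices come from range(len(s)), so pyGetD's default is never used)
def pvScan (cs : List Char) (f : List Char → List Char) : List Int → Option String
  | [] => none
  | i :: rest =>
      let c := PySem.List.pyGetD cs i ' '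
      if [c] ≠ f [c] then some "No" else pvScan cs f rest

def is_hard_to_read (s : String) : String :=
  match pvScan s.toList PySem.Chars.upper (PySem.List.pyRange 0 (PySem.Str.len s) 2) with
  | some r => r
  | none =>
    match pvScan s.toList PySem.Chars.lower (PySem.List.pyRange 1 (PySem.Str.len s) 2) with
    | some r => r
    | none => "Yes"

-- ===== PORT B =====
def is_hard_to_read_alt (s : String) : String :=
  let cs := s.toList
  let even := (PySem.List.slice? cs none none 2).getD []
  let odd  := (PySem.List.slice? cs (some 1) none 2).getD []
  if even = PySem.Chars.upper even ∧ odd = PySem.Chars.lower odd then "Yes" else "No"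

-- ===== PRECONDITION & SPEC =====
def Spec_is_hard_to_read (s : String) (out : String) : Prop := out = is_hard_to_read_alt s
instance (s : String) (out : String) : Decidable (Spec_is_hard_to_read s out) := by unfold Spec_is_hard_to_read; infer_instance

-- ===== CLAIM (what is proved, stated in full; the proofs are below) =====
def Claim_equal_is_hard_to_read : Prop := ∀ (s : String), Dom_is_hard_to_read s → Spec_is_hard_to_read s (is_hard_to_read s)

-- ===== LEMMAS AND PROOFS =====

-- the characters of cs at even / odd positions (what s[::2] / s[1::2] select)
def pvEvens : List Char → List Char
  | [] => []
  | [a] => [a]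
  | a :: _ :: t => a :: pvEvens t

def pvOdds : List Char → List Char
  | [] => []
  | [_] => []
  | _ :: b :: t => b :: pvOdds t

lemma scan_eq_all (cs : List Char) (f : List Char → List Char) (idxs : List Int) :
    pvScan cs f idxs =
      if idxs.all (fun i => [PySem.List.pyGetD cs i ' '] = f [PySem.List.pyGetD cs i ' ']) then none
      else some "No" := by
  induction idxs with
  | nil => simp [pvScan]
  | cons i rest ih =>
    simp only [pvScan, List.all_cons, ih]
    by_cases h1 : [PySem.List.pyGetD cs i ' '] = f [PySem.List.pyGetD cs i ' ']
    · simp [← h1]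
    · simp [h1]

lemma pyRange_even (n : Nat) :
    PySem.List.pyRange 0 (n : Int) 2 = (List.range ((n+1)/2)).map (fun k => ((2*k : Nat) : Int)) := by
  rw [PySem.List.pyRange_of_pos 0 (n : Int) (by norm_num)]
  have hc : (if (0:Int) < n then (((n:Int) - 0 + 2 - 1) / 2).toNat else 0) = (n+1)/2 := by
    split_ifs <;> omega
  rw [hc]
  apply List.map_congr_left
  intro k _
  push_cast; ring

lemma pyRange_odd (n : Nat) :
    PySem.List.pyRange 1 (n : Int) 2 = (List.range (n/2)).map (fun k => ((1+2*k : Nat) : Int)) := by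
  rw [PySem.List.pyRange_of_pos 1 (n : Int) (by norm_num)]
  have hc : (if (1:Int) < n then (((n:Int) - 1 + 2 - 1) / 2).toNat else 0) = n/2 := by
    split_ifs <;> omega
  rw [hc]
  apply List.map_congr_left
  intro k _
  push_cast; ring

lemma evensAll (Q : Char → Bool) (cs : List Char) :
    (List.range ((cs.length+1)/2)).all (fun k => Q (PySem.List.pyGetD cs ((2*k : Nat) : Int) ' '))
      = (pvEvens cs).all Q := by
  induction cs using pvEvens.induct with
  | case1 => simp [pvEvens]
  | case2 a =>
    have h : (([a] : List Char).length + 1)/2 = 1 := by simp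
    rw [h, List.range_one, List.all_cons, List.all_nil, PySem.List.pyGetD_natCast]
    simp [pvEvens]
  | case3 a b t ih =>
    have h : ((a::b::t).length + 1)/2 = (t.length+1)/2 + 1 := by simp; omega
    rw [h, List.range_succ_eq_map, List.all_cons, List.all_map]
    have h2 : ∀ k : Nat, PySem.List.pyGetD (a::b::t) ((2*(k+1) : Nat) : Int) ' '
        = PySem.List.pyGetD t ((2*k : Nat) : Int) ' ' := by
      intro k
      rw [PySem.List.pyGetD_natCast, PySem.List.pyGetD_natCast]
      have e : 2*(k+1) = (2*k+1)+1 := by ring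
      rw [e, List.getD_cons_succ, List.getD_cons_succ]
    have h1 : PySem.List.pyGetD (a::b::t) ((2*0 : Nat) : Int) ' ' = a := by
      rw [PySem.List.pyGetD_natCast]; rfl
    simp only [Function.comp_def, Nat.succ_eq_add_one, h1, h2, ih]
    simp [pvEvens]

lemma oddsAll (Q : Char → Bool) (cs : List Char) :
    (List.range (cs.length/2)).all (fun k => Q (PySem.List.pyGetD cs ((1+2*k : Nat) : Int) ' '))
      = (pvOdds cs).all Q := by
  induction cs using pvOdds.induct with
  | case1 => simp [pvOdds]
  | case2 a => simp [pvOdds]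
  | case3 a b t ih =>
    have h : (a::b::t).length/2 = t.length/2 + 1 := by simp; omega
    rw [h, List.range_succ_eq_map, List.all_cons, List.all_map]
    have h2 : ∀ k : Nat, PySem.List.pyGetD (a::b::t) ((1+2*(k+1) : Nat) : Int) ' '
        = PySem.List.pyGetD t ((1+2*k : Nat) : Int) ' ' := by
      intro k
      rw [PySem.List.pyGetD_natCast, PySem.List.pyGetD_natCast]
      have e : 1+2*(k+1) = ((1+2*k)+1)+1 := by ring
      rw [e, List.getD_cons_succ, List.getD_cons_succ]
    have h1 : PySem.List.pyGetD (a::b::t) ((1+2*0 : Nat) : Int) ' ' = b := by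
      rw [PySem.List.pyGetD_natCast]; rfl
    simp only [Function.comp_def, Nat.succ_eq_add_one, h1, h2, ih]
    simp [pvOdds]

lemma fmEvens (cs : List Char) :
    (List.range ((cs.length+1)/2)).filterMap (fun k => cs[2*k]?) = pvEvens cs := by
  induction cs using pvEvens.induct with
  | case1 => simp [pvEvens]
  | case2 a =>
    have h : (([a] : List Char).length + 1)/2 = 1 := by simp
    rw [h, List.range_one]
    simp [pvEvens]
  | case3 a b t ih =>
    have h : ((a::b::t).length + 1)/2 = (t.length+1)/2 + 1 := by simp; omega
    rw [h, List.range_succ_eq_map, List.filterMap_cons, List.filterMap_map]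
    have h2 : ∀ k : Nat, (a::b::t)[2*(k+1)]? = t[2*k]? := by
      intro k
      have e : 2*(k+1) = (2*k+1)+1 := by ring
      rw [e, List.getElem?_cons_succ, List.getElem?_cons_succ]
    simp only [Function.comp_def, Nat.succ_eq_add_one, h2, ih]
    simp [pvEvens]

lemma fmOdds (cs : List Char) :
    (List.range (cs.length/2)).filterMap (fun k => cs[1+2*k]?) = pvOdds cs := by
  induction cs using pvOdds.induct with
  | case1 => simp [pvOdds]
  | case2 a => simp [pvOdds]
  | case3 a b t ih =>
    have h : (a::b::t).length/2 = t.length/2 + 1 := by simp; omega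
    rw [h, List.range_succ_eq_map, List.filterMap_cons, List.filterMap_map]
    have h2 : ∀ k : Nat, (a::b::t)[1+2*(k+1)]? = t[1+2*k]? := by
      intro k
      have e : 1+2*(k+1) = ((1+2*k)+1)+1 := by ring
      rw [e, List.getElem?_cons_succ, List.getElem?_cons_succ]
    simp only [Function.comp_def, Nat.succ_eq_add_one, h2, ih]
    simp [pvOdds]

lemma slice_even (cs : List Char) :
    PySem.List.slice? cs none none 2 = some (pvEvens cs) := by
  simp only [PySem.List.slice?, PySem.List.sliceIndices]
  norm_num
  have hc : (if 0 < cs.length then (((cs.length:Int) + 2 - 1) / 2).toNat else 0)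
      = (cs.length+1)/2 := by split_ifs <;> omega
  have hf : ∀ k : Nat, cs[(2 * (k:Int)).toNat]? = cs[2*k]? := by
    intro k
    have e : (2 * (k:Int)).toNat = 2*k := by omega
    rw [e]
  rw [hc]
  simp only [hf]
  exact fmEvens cs

lemma slice_odd (cs : List Char) :
    PySem.List.slice? cs (some 1) none 2 = some (pvOdds cs) := by
  cases cs with
  | nil => decide
  | cons a t =>
    simp only [PySem.List.slice?, PySem.List.sliceIndices]
    norm_num
    have hc : (if 0 < t.length then (((t.length:Int) + 2 - 1) / 2).toNat else 0)
        = (a::t).length/2 := by split_ifs <;> simp <;> omega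
    have hf : ∀ k : Nat, (a::t)[(1 + 2 * (k:Int)).toNat]? = (a::t)[1+2*k]? := by
      intro k
      have e : (1 + 2 * (k:Int)).toNat = 1+2*k := by omega
      rw [e]
    rw [hc]
    simp only [hf]
    exact fmOdds (a::t)

lemma allUpper (l : List Char) :
    (l.all fun c => decide (([c] : List Char) = PySem.Chars.upper [c])) = true ↔ l = PySem.Chars.upper l := by
  induction l with
  | nil => simp [PySem.Chars.upper]
  | cons a l ih =>
    simp only [List.all_cons, Bool.and_eq_true, PySem.Chars.upper, List.map_cons, List.map_nil,
      decide_eq_true_eq, List.cons.injEq, and_true] at ih ⊢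
    exact and_congr_right fun _ => ih

lemma allLower (l : List Char) :
    (l.all fun c => decide (([c] : List Char) = PySem.Chars.lower [c])) = true ↔ l = PySem.Chars.lower l := by
  induction l with
  | nil => simp [PySem.Chars.lower]
  | cons a l ih =>
    simp only [List.all_cons, Bool.and_eq_true, PySem.Chars.lower, List.map_cons, List.map_nil,
      decide_eq_true_eq, List.cons.injEq, and_true] at ih ⊢
    exact and_congr_right fun _ => ih

-- ===== VERDICT (by name: the statement is the Claim_ definition above) =====
theorem is_hard_to_read_spec : Claim_equal_is_hard_to_read := by
  intro s _
  unfold Spec_is_hard_to_read is_hard_to_read is_hard_to_read_alt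
  simp only [slice_even, slice_odd, Option.getD_some]
  rw [PySem.Str.len_eq, pyRange_even, pyRange_odd, scan_eq_all, scan_eq_all]
  have hev : ((List.range ((s.toList.length+1)/2)).map (fun k => ((2*k : Nat) : Int))).all
      (fun i => decide (([PySem.List.pyGetD s.toList i ' '] : List Char)
        = PySem.Chars.upper [PySem.List.pyGetD s.toList i ' ']))
      = (pvEvens s.toList).all (fun c => decide (([c] : List Char) = PySem.Chars.upper [c])) := by
    rw [List.all_map]
    simp only [Function.comp_def]
    exact evensAll (fun c => decide (([c] : List Char) = PySem.Chars.upper [c])) s.toList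
  have hod : ((List.range (s.toList.length/2)).map (fun k => ((1+2*k : Nat) : Int))).all
      (fun i => decide (([PySem.List.pyGetD s.toList i ' '] : List Char)
        = PySem.Chars.lower [PySem.List.pyGetD s.toList i ' ']))
      = (pvOdds s.toList).all (fun c => decide (([c] : List Char) = PySem.Chars.lower [c])) := by
    rw [List.all_map]
    simp only [Function.comp_def]
    exact oddsAll (fun c => decide (([c] : List Char) = PySem.Chars.lower [c])) s.toList
  simp only [hev, hod]
  by_cases hE : pvEvens s.toList = PySem.Chars.upper (pvEvens s.toList)
  · have e1 := (allUpper (pvEvens s.toList)).mpr hE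
    by_cases hO : pvOdds s.toList = PySem.Chars.lower (pvOdds s.toList)
    · have e2 := (allLower (pvOdds s.toList)).mpr hO
      simp [e1, e2]
      exact ⟨hE, hO⟩
    · have e2 : ((pvOdds s.toList).all fun c => decide (([c] : List Char) = PySem.Chars.lower [c])) = false :=
        Bool.eq_false_iff.mpr fun h => hO ((allLower _).mp h)
      simp [e1, e2]
      exact fun _ => hO
  · have e1 : ((pvEvens s.toList).all fun c => decide (([c] : List Char) = PySem.Chars.upper [c])) = false :=
      Bool.eq_false_iff.mpr fun h => hE ((allUpper _).mp h)
    simp [e1]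
    exact fun h => absurd h hE
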